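-- pv_equiv track=rewrite | github.com/glizzykingdreko/ascii_chiper | ascii_chiper/utils.py | xor_base
-- ===== SOURCE A (Python) =====
-- from typing import List
--
-- def xor_base(ascii_list: List[int], key: List[int], base: int, start_idx: int, end_idx: int) -> List[int]:
--     """
--     Applies a sequence of XOR operations on a list of ASCII values using a base value and a key.
--
--     Args:
--         ascii_list: The list of ASCII values to transform.
--         key: The list of integers to XOR with each value in `ft`.
--         base: The initial value to XOR with the first element in `ft`.
--         start_idx: The index of the key to start using for XOR operations.
--         end_idx: The index of the key to stop using for XOR operations.
--
--     Returns:
--         A new list of transformed ASCII values.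
--     """
--     key_slice = key[start_idx:end_idx]
--     key_len = len(key_slice)
--     final = []
--     current_base = base
--     for i in range(len(ascii_list)):
--         xor = ascii_list[i] ^ key_slice[i % key_len] ^ current_base
--         final.append(xor)
--         current_base = xor
--     return final
-- ===== SOURCE B (Python) =====
-- from typing import List
--
-- def xor_base(ascii_list: List[int], key: List[int], base: int, start_idx: int, end_idx: int) -> List[int]:
--     ks = key[start_idx:end_idx]
--     if not ascii_list:
--         return []
--     k = len(ks)
--     # prefix-xor table of the key slice: pref[r] = ks[0]^...^ks[r-1]
--     pref = [0]
--     for x in ks: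
--         pref.append(pref[-1] ^ x)
--     cycle = pref[k]
--     out = []
--     acc = base
--     for i, a in enumerate(ascii_list):
--         acc ^= a
--         q, r = divmod(i + 1, k)
--         out.append(acc ^ (cycle if q % 2 else 0) ^ pref[r])
--     return out
-- ===== Notes on version B (the rewrite author's own statement) =====
-- stated objective: alternative
-- what changed: B abandons A's chained recurrence (each output XORed into the next step's base): it precomputes a prefix-XOR table of the key slice and emits each output independently by the closed form out[i] = base ^ prefixXor(ascii_list[0..i]) ^ (cycleXor if divmod(i+1,k) has odd quotient) ^ pref[(i+1)%k], so no per-step modulo key lookup and no feedback of the previous output.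
import Mathlib
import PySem

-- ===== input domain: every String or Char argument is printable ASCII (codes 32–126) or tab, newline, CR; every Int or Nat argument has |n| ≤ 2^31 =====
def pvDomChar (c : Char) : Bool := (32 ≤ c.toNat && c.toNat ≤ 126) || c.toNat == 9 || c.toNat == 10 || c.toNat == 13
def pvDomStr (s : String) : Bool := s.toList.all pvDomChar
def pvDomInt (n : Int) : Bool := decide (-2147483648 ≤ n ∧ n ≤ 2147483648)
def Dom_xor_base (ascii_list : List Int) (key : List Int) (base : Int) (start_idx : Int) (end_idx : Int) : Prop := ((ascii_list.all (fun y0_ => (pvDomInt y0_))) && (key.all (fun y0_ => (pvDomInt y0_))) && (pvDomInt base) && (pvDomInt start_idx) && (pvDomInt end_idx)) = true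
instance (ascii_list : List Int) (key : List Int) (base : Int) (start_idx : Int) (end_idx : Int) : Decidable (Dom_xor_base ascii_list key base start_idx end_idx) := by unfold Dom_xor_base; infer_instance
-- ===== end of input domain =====

-- B replaces A's chained current_base recurrence by a per-index closed form built from a prefix-XOR table of the key slice and the parity of divmod(i+1,k) (alternative decomposition, same return value).


-- ===== PORT A =====
def xor_base (ascii_list : List Int) (key : List Int) (base : Int) (start_idx : Int) (end_idx : Int) : List Int :=
  let key_slice := PySem.List.slice key (some start_idx) (some end_idx)
  let key_len : Int := key_slice.length
  ((PySem.List.pyRange 0 (ascii_list.length : Int) 1).foldl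
    (fun (st : List Int × Int) i =>
      let x := PySem.Int.bxor (PySem.Int.bxor (PySem.List.pyGetD ascii_list i 0)
                (PySem.List.pyGetD key_slice (PySem.Int.mod i key_len) 0)) st.2
      (st.1 ++ [x], x))
    ([], base)).1

-- ===== PORT B =====
def xor_base_alt (ascii_list : List Int) (key : List Int) (base : Int) (start_idx : Int) (end_idx : Int) : List Int :=
  let ks := PySem.List.slice key (some start_idx) (some end_idx)
  if ascii_list = [] then []
  else
    let k : Int := (ks.length : Int)
    let pref := ks.foldl (fun p x => p ++ [PySem.Int.bxor (PySem.List.pyGetD p (-1) 0) x]) [(0 : Int)]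
    let cycle := PySem.List.pyGetD pref k 0
    ((ascii_list.foldl
      (fun (st : List Int × Int × Int) a =>
        let acc := PySem.Int.bxor st.2.1 a
        let q := PySem.Int.floordiv (st.2.2 + 1) k
        let r := PySem.Int.mod (st.2.2 + 1) k
        (st.1 ++ [PySem.Int.bxor (PySem.Int.bxor acc (if PySem.Int.mod q 2 ≠ 0 then cycle else 0))
                    (PySem.List.pyGetD pref r 0)],
         acc, st.2.2 + 1))
      ([], base, 0)).1)

-- ===== PRECONDITION & SPEC =====
-- Pre_ excludes exactly the inputs where the key slice key[start_idx:end_idx] is empty while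
-- ascii_list is non-empty: there Python A raises ZeroDivisionError (i % 0), and B raises it too.
def Pre_xor_base (ascii_list : List Int) (key : List Int) (base : Int) (start_idx : Int) (end_idx : Int) : Prop :=
  ascii_list = [] ∨ PySem.List.slice key (some start_idx) (some end_idx) ≠ []
instance (ascii_list : List Int) (key : List Int) (base : Int) (start_idx : Int) (end_idx : Int) : Decidable (Pre_xor_base ascii_list key base start_idx end_idx) := by unfold Pre_xor_base; infer_instance
def pvWitness_xor_base : List Int × List Int × Int × Int × Int := ([65, 66, 67], [3, 14, 15], 42, 0, 2)

def Spec_xor_base (ascii_list : List Int) (key : List Int) (base : Int) (start_idx : Int) (end_idx : Int) (out : List Int) : Prop := out = xor_base_alt ascii_list key base start_idx end_idx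
instance (ascii_list : List Int) (key : List Int) (base : Int) (start_idx : Int) (end_idx : Int) (out : List Int) : Decidable (Spec_xor_base ascii_list key base start_idx end_idx out) := by unfold Spec_xor_base; infer_instance

-- ===== CLAIM (what is proved, stated in full; the proofs are below) =====
def Claim_equal_xor_base : Prop := ∀ (ascii_list : List Int) (key : List Int) (base : Int) (start_idx : Int) (end_idx : Int), Dom_xor_base ascii_list key base start_idx end_idx → Pre_xor_base ascii_list key base start_idx end_idx → Spec_xor_base ascii_list key base start_idx end_idx (xor_base ascii_list key base start_idx end_idx)

-- ===== LEMMAS AND PROOFS =====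

def pvEnc (s : Bool) (n : Nat) : Int := if s then -(n : Int) - 1 else (n : Int)
theorem pvBxor_enc (s t : Bool) (m n : Nat) :
    PySem.Int.bxor (pvEnc s m) (pvEnc t n) = pvEnc (xor s t) (m ^^^ n) := by
  cases s <;> cases t <;> simp [pvEnc, PySem.Int.bxor] <;>
    (first | (intro h; omega) | (split_ifs <;> omega))
theorem pvDecEnc (a : Int) : ∃ s n, a = pvEnc s n := by
  by_cases h : a < 0
  · exact ⟨true, (-a).toNat - 1, by simp [pvEnc]; omega⟩
  · exact ⟨false, a.toNat, by simp [pvEnc]; omega⟩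
theorem pvBxor_assoc (a b c : Int) :
    PySem.Int.bxor (PySem.Int.bxor a b) c = PySem.Int.bxor a (PySem.Int.bxor b c) := by
  obtain ⟨s, m, rfl⟩ := pvDecEnc a
  obtain ⟨t, n, rfl⟩ := pvDecEnc b
  obtain ⟨u, p, rfl⟩ := pvDecEnc c
  rw [pvBxor_enc, pvBxor_enc, pvBxor_enc, pvBxor_enc, Bool.xor_assoc, Nat.xor_assoc]
theorem pvBxor_left_comm (a b c : Int) :
    PySem.Int.bxor a (PySem.Int.bxor b c) = PySem.Int.bxor b (PySem.Int.bxor a c) := by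
  rw [← pvBxor_assoc, PySem.Int.bxor_comm a b, pvBxor_assoc]
theorem pvBxor_zero_left (a : Int) : PySem.Int.bxor 0 a = a := by
  rw [PySem.Int.bxor_comm]; exact PySem.Int.bxor_zero a

def pvScan (f : Int → Int → Int) (acc : Int) : List Int → List Int
  | [] => []
  | x :: xs => f acc x :: pvScan f (f acc x) xs
theorem pvScan_length (f : Int → Int → Int) (acc : Int) (l : List Int) :
    (pvScan f acc l).length = l.length := by
  induction l generalizing acc with
  | nil => rfl
  | cons x xs ih => simp [pvScan, ih]
theorem pvScan_getElem (f : Int → Int → Int) (l : List Int) (acc : Int) (r : Nat)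
    (h : r < l.length) :
    (pvScan f acc l)[r]? = some ((l.take (r + 1)).foldl f acc) := by
  induction l generalizing acc r with
  | nil => simp at h
  | cons x xs ih =>
      cases r with
      | zero => simp [pvScan]
      | succ s =>
          simp only [pvScan, List.getElem?_cons_succ, List.take_succ_cons, List.foldl_cons]
          exact ih (f acc x) s (by simpa using h)

def pvP (ks : List Int) (r : Nat) : Int := (ks.take r).foldl PySem.Int.bxor 0
def pvXif (ks : List Int) (m : Nat) : Int :=
  if (m / ks.length) % 2 = 1 then pvP ks ks.length else 0
def pvG (ks : List Int) (m : Nat) : Int :=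
  PySem.Int.bxor (pvXif ks m) (pvP ks (m % ks.length))

theorem pvP_succ (ks : List Int) (r : Nat) (hr : r < ks.length) :
    pvP ks (r + 1) = PySem.Int.bxor (pvP ks r) (ks.getD r 0) := by
  unfold pvP
  rw [List.take_add_one, List.getElem?_eq_getElem hr, List.foldl_append]
  simp [List.getD, List.getElem?_eq_getElem hr]

theorem pvDM (κ j : Nat) (hκ0 : 0 < κ) :
    ((j % κ + 1 < κ) ∧ (j+1) % κ = j % κ + 1 ∧ (j+1)/κ = j/κ) ∨
    (j % κ + 1 = κ ∧ (j+1) % κ = 0 ∧ (j+1)/κ = j/κ + 1) := by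
  have h := Nat.div_add_mod j κ
  have hr : j % κ < κ := Nat.mod_lt _ hκ0
  have h' : j + 1 = (j % κ + 1) + (j / κ) * κ := by
    have h2 : (j/κ) * κ + j % κ = j := by rw [Nat.mul_comm]; exact h
    omega
  have hmod : (j+1) % κ = (j % κ + 1) % κ := by rw [h', Nat.add_mul_mod_self_right]
  have hdiv : (j+1) / κ = (j % κ + 1)/κ + j/κ := by rw [h', Nat.add_mul_div_right _ _ hκ0]
  by_cases hc : j % κ + 1 < κ
  · exact Or.inl ⟨hc, by rw [hmod, Nat.mod_eq_of_lt hc],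
      by rw [hdiv, Nat.div_eq_of_lt hc, Nat.zero_add]⟩
  · have hk : j % κ + 1 = κ := by omega
    exact Or.inr ⟨hk, by rw [hmod, hk, Nat.mod_self],
      by rw [hdiv, hk, Nat.div_self hκ0, Nat.add_comm]⟩

theorem pvG_succ (ks : List Int) (hks : ks ≠ []) (j : Nat) :
    pvG ks (j + 1) = PySem.Int.bxor (pvG ks j) (ks.getD (j % ks.length) 0) := by
  have hκ0 : 0 < ks.length := List.length_pos_iff.mpr hks
  have hr : j % ks.length < ks.length := Nat.mod_lt _ hκ0
  rcases pvDM ks.length j hκ0 with ⟨hc, h1, h2⟩ | ⟨hk, h1, h2⟩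
  · unfold pvG pvXif
    simp only [h1, h2, pvP_succ ks (j % ks.length) hr, pvBxor_assoc]
  · have hPk : pvP ks ks.length
        = PySem.Int.bxor (pvP ks (j % ks.length)) (ks.getD (j % ks.length) 0) := by
      conv_lhs => rw [← hk]
      exact pvP_succ ks _ hr
    unfold pvG pvXif
    rw [h1, h2]
    rcases Nat.mod_two_eq_zero_or_one (j / ks.length) with hqe | hqe
    · rw [if_pos (by omega), if_neg (by omega),
          show pvP ks 0 = 0 from rfl, PySem.Int.bxor_zero, pvBxor_zero_left, ← hPk]
    · rw [if_neg (by omega), if_pos (by omega),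
          show pvP ks 0 = 0 from rfl, PySem.Int.bxor_zero, pvBxor_assoc, ← hPk,
          PySem.Int.bxor_self]

def pvA (ks : List Int) : Int → Nat → List Int → List Int
  | _, _, [] => []
  | c, j, a :: l =>
      let x := PySem.Int.bxor (PySem.Int.bxor a (ks.getD (j % ks.length) 0)) c
      x :: pvA ks x (j + 1) l
def pvB (ks : List Int) : Int → Nat → List Int → List Int
  | _, _, [] => []
  | acc, j, a :: l =>
      let acc' := PySem.Int.bxor acc a
      PySem.Int.bxor (PySem.Int.bxor acc' (pvXif ks (j + 1))) (pvP ks ((j + 1) % ks.length))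
        :: pvB ks acc' (j + 1) l

theorem pvShuffle (a K C G : Int) :
    PySem.Int.bxor (PySem.Int.bxor a K) (PySem.Int.bxor C G)
      = PySem.Int.bxor (PySem.Int.bxor C a) (PySem.Int.bxor G K) := by
  simp only [pvBxor_assoc]
  rw [pvBxor_left_comm K C, pvBxor_left_comm a C, PySem.Int.bxor_comm K G]

theorem pvA_eq_pvB (ks : List Int) (hks : ks ≠ []) (l : List Int) :
    ∀ (j : Nat) (acc c : Int), c = PySem.Int.bxor acc (pvG ks j) →
      pvA ks c j l = pvB ks acc j l := by
  induction l with
  | nil => intro j acc c _; rfl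
  | cons a l ih =>
      intro j acc c h
      simp only [pvA, pvB]
      have hstep : PySem.Int.bxor (pvXif ks (j + 1)) (pvP ks ((j + 1) % ks.length))
          = PySem.Int.bxor (pvG ks j) (ks.getD (j % ks.length) 0) := pvG_succ ks hks j
      have hhead : PySem.Int.bxor (PySem.Int.bxor a (ks.getD (j % ks.length) 0)) c
          = PySem.Int.bxor (PySem.Int.bxor (PySem.Int.bxor acc a) (pvXif ks (j + 1)))
              (pvP ks ((j + 1) % ks.length)) := by
        rw [h, pvBxor_assoc (PySem.Int.bxor acc a), hstep, pvShuffle]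
      rw [hhead]
      congr 1
      apply ih
      rw [pvBxor_assoc]
      rfl

theorem pvFoldA (al ks : List Int) :
    ∀ (j : Nat), j ≤ al.length → ∀ (out : List Int) (c : Int),
    ((PySem.List.pyRange (j : Int) (al.length : Int) 1).foldl
      (fun (st : List Int × Int) i =>
        let x := PySem.Int.bxor (PySem.Int.bxor (PySem.List.pyGetD al i 0)
                  (PySem.List.pyGetD ks (PySem.Int.mod i (ks.length : Int)) 0)) st.2
        (st.1 ++ [x], x))
      (out, c)).1 = out ++ pvA ks c j (al.drop j) := by
  intro j
  induction hfuel : al.length - j generalizing j with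
  | zero =>
      intro hj out c
      have hj' : j = al.length := by omega
      subst hj'
      rw [PySem.List.pyRange_one_eq_nil (by omega), List.drop_length]
      simp [pvA]
  | succ m ih =>
      intro hj out c
      have hlt : j < al.length := by omega
      rw [PySem.List.pyRange_one_cons (by exact_mod_cast hlt), List.foldl_cons]
      have hdrop : al.drop j = al[j] :: al.drop (j + 1) := (List.getElem_cons_drop hlt).symm
      rw [hdrop]
      simp only [pvA]
      have hget : PySem.List.pyGetD al ((j : Nat) : Int) 0 = al[j] := by
        simp [PySem.List.pyGetD_natCast, List.getD, List.getElem?_eq_getElem hlt]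
      have hmod : PySem.Int.mod ((j : Nat) : Int) ((ks.length : Nat) : Int)
          = (((j % ks.length : Nat)) : Int) := PySem.Int.mod_natCast j ks.length
      rw [hget, hmod, PySem.List.pyGetD_natCast]
      have hcast : ((j : Int) + 1) = (((j + 1 : Nat)) : Int) := by push_cast; ring
      rw [hcast, ih (j + 1) (by omega) (by omega)]
      simp [List.append_assoc]

theorem pvFoldPref :
    ∀ (l pre : List Int) (acc : Int) (h : pre ≠ []), pre.getLast h = acc →
    l.foldl (fun p x => p ++ [PySem.Int.bxor (PySem.List.pyGetD p (-1) 0) x]) pre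
      = pre ++ pvScan PySem.Int.bxor acc l := by
  intro l
  induction l with
  | nil => intro pre acc h hl; simp [pvScan]
  | cons x xs ih =>
      intro pre acc h hl
      have hget : PySem.List.pyGetD pre (-1) (0 : Int) = acc := by
        rw [PySem.List.pyGetD_neg_one (h := h)]; exact hl
      rw [List.foldl_cons, hget]
      rw [ih (pre ++ [PySem.Int.bxor acc x]) (PySem.Int.bxor acc x) (by simp)
        List.getLast_concat]
      simp [pvScan, List.append_assoc]

theorem pvPrefGet (ks : List Int) (r : Nat) (hr : r ≤ ks.length) :
    PySem.List.pyGetD ((0 : Int) :: pvScan PySem.Int.bxor 0 ks) ((r : Nat) : Int) 0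
      = pvP ks r := by
  rw [PySem.List.pyGetD_natCast]
  cases r with
  | zero => rfl
  | succ s =>
      have hs : s < ks.length := by omega
      have hslen : s < (pvScan PySem.Int.bxor 0 ks).length := by rw [pvScan_length]; exact hs
      simp [List.getD, pvScan_getElem PySem.Int.bxor ks 0 s hs, pvP]

theorem pvFoldB (ks : List Int) (hks : ks ≠ []) (al : List Int) :
    ∀ (out : List Int) (acc : Int) (j : Nat),
    ((al.foldl
      (fun (st : List Int × Int × Int) a =>
        let acc' := PySem.Int.bxor st.2.1 a
        let q := PySem.Int.floordiv (st.2.2 + 1) (ks.length : Int)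
        let r := PySem.Int.mod (st.2.2 + 1) (ks.length : Int)
        (st.1 ++ [PySem.Int.bxor (PySem.Int.bxor acc' (if PySem.Int.mod q 2 ≠ 0 then pvP ks ks.length else 0))
                    (PySem.List.pyGetD ((0 : Int) :: pvScan PySem.Int.bxor 0 ks) r 0)],
         acc', st.2.2 + 1))
      (out, acc, ((j : Nat) : Int))).1) = out ++ pvB ks acc j al := by
  have hκ0 : 0 < ks.length := List.length_pos_iff.mpr hks
  intro out acc j
  induction al generalizing out acc j with
  | nil => simp [pvB]
  | cons a l ih =>
      rw [List.foldl_cons]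
      simp only
      have hcast : (((j : Nat) : Int) + 1) = (((j + 1 : Nat)) : Int) := by push_cast; ring
      have hdiv : PySem.Int.floordiv (((j + 1 : Nat)) : Int) ((ks.length : Nat) : Int)
          = ((((j + 1) / ks.length : Nat)) : Int) := PySem.Int.floordiv_natCast _ _
      have hmod : PySem.Int.mod (((j + 1 : Nat)) : Int) ((ks.length : Nat) : Int)
          = ((((j + 1) % ks.length : Nat)) : Int) := PySem.Int.mod_natCast _ _
      have hif : (if PySem.Int.mod ((((j + 1) / ks.length : Nat)) : Int) 2 ≠ 0
            then pvP ks ks.length else 0) = pvXif ks (j + 1) := by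
        unfold pvXif
        have h2 : PySem.Int.mod ((((j + 1) / ks.length : Nat)) : Int) 2
            = ((((j + 1) / ks.length % 2 : Nat)) : Int) := by
          exact_mod_cast PySem.Int.mod_natCast ((j + 1) / ks.length) 2
        rw [h2]
        rcases Nat.mod_two_eq_zero_or_one ((j + 1) / ks.length) with hpar | hpar <;>
          simp [hpar]
      have hpg := pvPrefGet ks ((j + 1) % ks.length) (le_of_lt (Nat.mod_lt _ hκ0))
      rw [hcast, hdiv, hmod, hif, hpg, ih]
      simp [pvB, List.append_assoc]

theorem pvFinal (ascii_list : List Int) (key : List Int) (base : Int) (start_idx : Int) (end_idx : Int)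
    (hpre : Pre_xor_base ascii_list key base start_idx end_idx) :
    xor_base ascii_list key base start_idx end_idx = xor_base_alt ascii_list key base start_idx end_idx := by
  unfold xor_base xor_base_alt
  dsimp only
  by_cases hnil : ascii_list = []
  · subst hnil
    rw [if_pos rfl]
    rw [show PySem.List.pyRange 0 ((([] : List Int).length : Int)) 1 = [] from
      PySem.List.pyRange_one_eq_nil (by simp)]
    rfl
  · rcases hpre with h | hksne
    · exact absurd h hnil
    rw [if_neg hnil]
    generalize hks : PySem.List.slice key (some start_idx) (some end_idx) = ks at hksne ⊢
    have hpref := pvFoldPref ks [(0 : Int)] 0 (by simp) rfl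
    simp only [hpref, List.singleton_append]
    have hcyc := pvPrefGet ks ks.length (le_refl _)
    simp only [hcyc]
    have hA := pvFoldA ascii_list ks 0 (Nat.zero_le _) [] base
    simp only [Nat.cast_zero, List.drop_zero, List.nil_append] at hA
    have hB := pvFoldB ks hksne ascii_list [] base 0
    simp only [Nat.cast_zero, List.nil_append] at hB
    rw [hA, hB]
    apply pvA_eq_pvB ks hksne ascii_list 0 base base
    simp [pvG, pvXif, pvP]

-- ===== VERDICT (by name: the statement is the Claim_ definition above) =====
theorem xor_base_spec : Claim_equal_xor_base := by
  intro ascii_list key base start_idx end_idx _hdom hpre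
  exact pvFinal ascii_list key base start_idx end_idx hpre
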